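-- pv_equiv track=rewrite | github.com/IronAdamant/PythonBol-Translator | src/cobol_safe_translator/statement_translators.py | _split_at_end_body
-- ===== SOURCE A (Python) =====
-- def _split_at_end_body(tokens: list[str]) -> list[list[str]]:
--     """Split AT END body tokens into individual verb statements.
--
--     Recognizes verb boundaries by looking for known COBOL verbs.
--     Returns a list of token-lists, one per verb.
--     """
--     _BODY_VERBS = frozenset({
--         "DISPLAY", "MOVE", "SET", "STOP", "PERFORM", "ADD", "SUBTRACT",
--         "COMPUTE", "GO", "STRING", "UNSTRING", "CALL", "EVALUATE",
--         "IF", "CLOSE", "OPEN", "WRITE", "READ", "INITIALIZE",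
--     })
--     stmts: list[list[str]] = []
--     current: list[str] = []
--     for tok in tokens:
--         if tok.upper() in _BODY_VERBS and current:
--             stmts.append(current)
--             current = [tok]
--         else:
--             current.append(tok)
--     if current:
--         stmts.append(current)
--     return stmts
-- ===== SOURCE B (Python) =====
-- def _split_at_end_body(tokens: list[str]) -> list[list[str]]:
--     """Split AT END body tokens into individual verb statements.
--
--     Two-pointer version: each statement starts at i and extends with the
--     longest run of non-verb tokens after it; emit the slice, jump to j.
--     """
--     _BODY_VERBS = frozenset({
--         "DISPLAY", "MOVE", "SET", "STOP", "PERFORM", "ADD", "SUBTRACT",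
--         "COMPUTE", "GO", "STRING", "UNSTRING", "CALL", "EVALUATE",
--         "IF", "CLOSE", "OPEN", "WRITE", "READ", "INITIALIZE",
--     })
--     out: list[list[str]] = []
--     i = 0
--     n = len(tokens)
--     while i < n:
--         j = i + 1
--         while j < n and tokens[j].upper() not in _BODY_VERBS:
--             j += 1
--         out.append(tokens[i:j])
--         i = j
--     return out
-- ===== Notes on version B (the rewrite author's own statement) =====
-- stated objective: alternative
-- what changed: Replaced the accumulator fold (append-into-current, flush on verb) by a two-pointer scan that finds the end of each statement and emits the slice tokens[i:j] directly.
import Mathlib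
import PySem

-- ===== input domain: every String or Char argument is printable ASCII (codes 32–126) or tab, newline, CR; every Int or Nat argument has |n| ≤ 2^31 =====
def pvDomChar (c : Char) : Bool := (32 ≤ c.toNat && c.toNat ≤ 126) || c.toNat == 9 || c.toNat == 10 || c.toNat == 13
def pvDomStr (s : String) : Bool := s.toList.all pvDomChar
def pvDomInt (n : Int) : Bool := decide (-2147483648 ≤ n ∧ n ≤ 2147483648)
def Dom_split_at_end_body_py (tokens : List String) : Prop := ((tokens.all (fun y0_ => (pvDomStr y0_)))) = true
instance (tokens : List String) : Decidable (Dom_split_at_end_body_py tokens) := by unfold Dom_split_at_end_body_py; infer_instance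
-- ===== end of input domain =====

-- B replaces A's accumulator fold by a two-pointer scan that emits each statement as a slice; alternative decomposition, same cost.
-- ===== PORT A =====
def pvVerbs : List String :=
  ["DISPLAY", "MOVE", "SET", "STOP", "PERFORM", "ADD", "SUBTRACT",
   "COMPUTE", "GO", "STRING", "UNSTRING", "CALL", "EVALUATE",
   "IF", "CLOSE", "OPEN", "WRITE", "READ", "INITIALIZE"]

def pvIsVerb (t : String) : Bool := pvVerbs.contains (PySem.Str.upper t)

-- A: fold with (stmts, current); on a verb with nonempty current, flush; finally flush current
def split_at_end_body_py (tokens : List String) : List (List String) :=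
  let st := tokens.foldl (fun (s : List (List String) × List String) tok =>
      if pvIsVerb tok ∧ s.2 ≠ [] then (s.1 ++ [s.2], [tok]) else (s.1, s.2 ++ [tok]))
    ([], [])
  if st.2 ≠ [] then st.1 ++ [st.2] else st.1


-- ===== PORT B =====
-- B: two-pointer scan; the inner `while j < n and not verb` is the takeWhile/dropWhile split,
-- the emitted slice tokens[i:j] is t :: run; outer while = recursion on the remaining suffix
def split_at_end_body_py_alt (tokens : List String) : List (List String) :=
  match tokens with
  | [] => []
  | t :: rest =>
    let run := rest.takeWhile (fun x => !pvIsVerb x)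
    (t :: run) :: split_at_end_body_py_alt (rest.dropWhile (fun x => !pvIsVerb x))
termination_by tokens.length
decreasing_by
  exact Nat.lt_succ_of_le (List.length_dropWhile_le _ _)


-- ===== PRECONDITION & SPEC =====
def Spec_split_at_end_body_py (tokens : List String) (out : List (List String)) : Prop := out = split_at_end_body_py_alt tokens
instance (tokens : List String) (out : List (List String)) : Decidable (Spec_split_at_end_body_py tokens out) := by unfold Spec_split_at_end_body_py; infer_instance

-- ===== CLAIM (what is proved, stated in full; the proofs are below) =====
def Claim_equal_split_at_end_body_py : Prop := ∀ (tokens : List String), Dom_split_at_end_body_py tokens → Spec_split_at_end_body_py tokens (split_at_end_body_py tokens)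

-- ===== LEMMAS AND PROOFS =====

theorem pvAlt_nil : split_at_end_body_py_alt [] = [] := by
  rw [split_at_end_body_py_alt]

theorem pvAlt_cons (t : String) (rest : List String) :
    split_at_end_body_py_alt (t :: rest) =
      (t :: rest.takeWhile (fun x => !pvIsVerb x)) ::
        split_at_end_body_py_alt (rest.dropWhile (fun x => !pvIsVerb x)) := by
  rw [split_at_end_body_py_alt]

-- A's loop as structural recursion on the token list, current accumulated
def pvLoop (cur : List String) : List String → List (List String)
  | [] => if cur ≠ [] then [cur] else []
  | t :: ts => if pvIsVerb t ∧ cur ≠ [] then cur :: pvLoop [t] ts else pvLoop (cur ++ [t]) ts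

theorem pvFoldl_loop (tokens : List String) (stmts : List (List String)) (cur : List String) :
    (let st := tokens.foldl (fun (s : List (List String) × List String) tok =>
        if pvIsVerb tok ∧ s.2 ≠ [] then (s.1 ++ [s.2], [tok]) else (s.1, s.2 ++ [tok]))
      (stmts, cur);
     if st.2 ≠ [] then st.1 ++ [st.2] else st.1) = stmts ++ pvLoop cur tokens := by
  induction tokens generalizing stmts cur with
  | nil => simp [pvLoop]; split <;> simp_all
  | cons t ts ih =>
    simp only [List.foldl_cons, pvLoop]
    by_cases h : pvIsVerb t ∧ cur ≠ [] <;> simp [h, ih]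

theorem pvLoop_ne (cur : List String) (hc : cur ≠ []) (ts : List String) :
    pvLoop cur ts =
      (cur ++ ts.takeWhile (fun x => !pvIsVerb x)) ::
        split_at_end_body_py_alt (ts.dropWhile (fun x => !pvIsVerb x)) := by
  induction ts generalizing cur with
  | nil => simp [pvLoop, pvAlt_nil, hc]
  | cons t ts ih =>
    by_cases h : pvIsVerb t
    · simp [pvLoop, h, hc, pvAlt_cons, ih [t] (by simp)]
    · simp [pvLoop, h, ih (cur ++ [t]) (by simp)]

-- ===== VERDICT (by name: the statement is the Claim_ definition above) =====
theorem split_at_end_body_py_spec : Claim_equal_split_at_end_body_py := by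
  intro tokens _
  unfold Spec_split_at_end_body_py split_at_end_body_py
  rw [pvFoldl_loop tokens [] []]
  cases tokens with
  | nil => simp [pvLoop, pvAlt_nil]
  | cons t ts =>
    simp only [pvLoop, pvAlt_cons]
    simp [pvLoop_ne [t] (by simp) ts]
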